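-- pv_equiv track=rewrite | github.com/themedworld/agricalcule | main.py | score_rouille_noire
-- ===== SOURCE A (Python) =====
-- def clamp(score):
--     return max(0, min(100, score))
--
-- def score_rouille_noire(hours):
--     score = 0
--     consecutive = 0
--
--     for h in hours[:24]:
--         if 18 <= h["temp"] <= 30 and h["humidity"] >= 90:
--             consecutive += 1
--             score += 6
--         else:
--             consecutive = 0
--
--         if consecutive >= 8:
--             score += 25
--
--     return clamp(score)
-- ===== SOURCE B (Python) =====
-- import itertools
--
-- def clamp(score):
--     return max(0, min(100, score))
--
-- def score_rouille_noire(hours):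
--     fav = [18 <= h["temp"] <= 30 and h["humidity"] >= 90 for h in hours[:24]]
--     score = 0
--     for val, grp in itertools.groupby(fav):
--         if val:
--             L = sum(1 for _ in grp)
--             score += 6 * L + 25 * max(0, L - 7)
--     return clamp(score)
-- ===== Notes on version B (the rewrite author's own statement) =====
-- stated objective: alternative
-- what changed: Replaces the per-hour running 'consecutive' counter with a groupby pass over maximal runs of favourable hours, scoring each run of length L in closed form as 6*L + 25*max(0, L-7).
import Mathlib
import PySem

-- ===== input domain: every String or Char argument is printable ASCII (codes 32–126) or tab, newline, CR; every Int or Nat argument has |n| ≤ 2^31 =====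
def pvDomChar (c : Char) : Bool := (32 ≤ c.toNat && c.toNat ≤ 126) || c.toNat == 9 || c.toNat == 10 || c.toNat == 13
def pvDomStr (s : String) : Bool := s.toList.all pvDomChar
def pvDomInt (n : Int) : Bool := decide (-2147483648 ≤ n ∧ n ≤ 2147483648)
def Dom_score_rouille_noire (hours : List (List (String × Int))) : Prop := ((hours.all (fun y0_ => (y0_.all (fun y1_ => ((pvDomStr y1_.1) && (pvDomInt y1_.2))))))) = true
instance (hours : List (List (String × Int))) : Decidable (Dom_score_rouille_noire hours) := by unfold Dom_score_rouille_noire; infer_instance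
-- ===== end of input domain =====

-- B replaces A's per-hour running `consecutive` counter with a groupby pass over maximal
-- runs of favourable hours, scoring each run of length L in closed form (alternative decomposition).

-- ===== PORT A =====
-- the favourability test `18 <= h["temp"] <= 30 and h["humidity"] >= 90`, with Python's
-- short-circuit: "humidity" is only looked up when the temperature is in range;
-- `none` = KeyError (both Pythons evaluate this same expression).
def favTest (h : List (String × Int)) : Option Bool :=
  match (PySem.Dict.mk h).get? "temp" with
  | none => none
  | some t =>
    if 18 ≤ t ∧ t ≤ 30 then
      match (PySem.Dict.mk h).get? "humidity" with
      | none => none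
      | some hu => some (decide (90 ≤ hu))
    else some false

-- one iteration of A's for-loop on state (score, consecutive); `none` = KeyError raised
def stepA (st : Option (Int × Int)) (h : List (String × Int)) : Option (Int × Int) :=
  match st with
  | none => none
  | some (s, c) =>
    match favTest h with
    | none => none
    | some b =>
      let c' := if b then c + 1 else 0
      let s' := if b then s + 6 else s
      some (if 8 ≤ c' then s' + 25 else s', c')

def score_rouille_noire (hours : List (List (String × Int))) : Int :=
  match (PySem.List.slice hours none (some 24)).foldl stepA (some (0, 0)) with
  | some (s, _) => max 0 (min 100 s)   -- clamp(score)
  | none => 0                          -- KeyError: excluded by Pre_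

-- ===== PORT B =====
-- itertools.groupby over a list of Bools: maximal runs as (value, length) pairs
def pyGroupby : List Bool → List (Bool × Int)
  | [] => []
  | b :: t =>
    (b, 1 + (t.takeWhile (· == b)).length) :: pyGroupby (t.dropWhile (· == b))
termination_by l => l.length
decreasing_by
  simp only [List.length_cons]
  exact Nat.lt_succ_of_le (List.length_dropWhile_le _ t)

def score_rouille_noire_alt (hours : List (List (String × Int))) : Int :=
  match (PySem.List.slice hours none (some 24)).mapM favTest with
  | none => 0                          -- KeyError in the comprehension: excluded by Pre_
  | some fav =>
    let score := (pyGroupby fav).foldl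
      (fun acc g => if g.1 then acc + 6 * g.2 + 25 * max 0 (g.2 - 7) else acc) 0
    max 0 (min 100 score)              -- clamp(score)

-- ===== PRECONDITION & SPEC =====
-- a single hour dict raises no KeyError: "temp" present, and "humidity" present when temp in [18,30]
def preHour (h : List (String × Int)) : Bool :=
  match (PySem.Dict.mk h).get? "temp" with
  | none => false
  | some t => !(decide (18 ≤ t) && decide (t ≤ 30)) || ((PySem.Dict.mk h).get? "humidity").isSome

-- excludes exactly the inputs where A raises KeyError: a dict among the first 24 hours
-- missing the "temp" key, or with in-range temp but missing the "humidity" key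
def Pre_score_rouille_noire (hours : List (List (String × Int))) : Prop :=
  ((hours.take 24).all preHour) = true
instance (hours : List (List (String × Int))) : Decidable (Pre_score_rouille_noire hours) := by
  unfold Pre_score_rouille_noire; infer_instance

def pvWitness_score_rouille_noire : (List (List (String × Int))) :=
  [[("temp", 20), ("humidity", 95)], [("temp", 5)], [("temp", 25), ("humidity", 80)]]

def Spec_score_rouille_noire (hours : List (List (String × Int))) (out : Int) : Prop := out = score_rouille_noire_alt hours
instance (hours : List (List (String × Int))) (out : Int) : Decidable (Spec_score_rouille_noire hours out) := by unfold Spec_score_rouille_noire; infer_instance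

-- ===== CLAIM (what is proved, stated in full; the proofs are below) =====
def Claim_equal_score_rouille_noire : Prop := ∀ (hours : List (List (String × Int))), Dom_score_rouille_noire hours → Pre_score_rouille_noire hours → Spec_score_rouille_noire hours (score_rouille_noire hours)

-- ===== LEMMAS AND PROOFS =====

-- Pre_ guarantees every favourability test succeeds
theorem favTest_isSome_of_pre (h : List (String × Int)) (hp : preHour h = true) :
    (favTest h).isSome := by
  unfold favTest
  unfold preHour at hp
  cases hg : (PySem.Dict.mk h).get? "temp" with
  | none => rw [hg] at hp; simp at hp
  | some t =>
    rw [hg] at hp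
    by_cases ht : 18 ≤ t ∧ t ≤ 30
    · simp [ht.1, ht.2] at hp
      cases hh : (PySem.Dict.mk h).get? "humidity" with
      | none => rw [hh] at hp; simp at hp
      | some hu => simp [ht]
    · simp [ht]

theorem mapM_favTest_isSome (hs : List (List (String × Int)))
    (hp : ∀ h ∈ hs, (favTest h).isSome) : (hs.mapM favTest).isSome := by
  induction hs with
  | nil => simp
  | cons h t ih =>
    have h1 := hp h (by simp)
    cases hg : favTest h with
    | none => rw [hg] at h1; simp at h1
    | some b =>
      have h2 := ih (fun x hx => hp x (by simp [hx]))
      cases ht : t.mapM favTest with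
      | none => rw [ht] at h2; simp at h2
      | some fs => simp [List.mapM_cons, hg, ht]

-- the pure version of A's loop body, on the Bool list
def stepP (sc : Int × Int) (b : Bool) : Int × Int :=
  let c' := if b then sc.2 + 1 else 0
  let s' := if b then sc.1 + 6 else sc.1
  (if 8 ≤ c' then s' + 25 else s', c')

theorem foldl_stepA_eq_stepP (hs : List (List (String × Int))) (fs : List Bool)
    (hm : hs.mapM favTest = some fs) :
    ∀ sc : Int × Int, hs.foldl stepA (some sc) = some (fs.foldl stepP sc) := by
  induction hs generalizing fs with
  | nil => intro sc; simp_all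
  | cons h t ih =>
    intro sc
    rw [List.mapM_cons] at hm
    cases hg : favTest h with
    | none => rw [hg] at hm; simp at hm
    | some b =>
      rw [hg] at hm
      cases ht : t.mapM favTest with
      | none => rw [ht] at hm; simp at hm
      | some fs' =>
        rw [ht] at hm
        obtain rfl : b :: fs' = fs := by simpa using hm
        simp only [List.foldl_cons]
        rw [← ih fs' ht]
        congr 1
        simp [stepA, stepP, hg]

-- B's per-group accumulation shifts out of the accumulator
theorem foldl_group_shift (gs : List (Bool × Int)) :
    ∀ a : Int, gs.foldl (fun acc g => if g.1 then acc + 6 * g.2 + 25 * max 0 (g.2 - 7) else acc) a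
      = a + gs.foldl (fun acc g => if g.1 then acc + 6 * g.2 + 25 * max 0 (g.2 - 7) else acc) 0 := by
  induction gs with
  | nil => intro a; simp
  | cons g t ih =>
    intro a
    simp only [List.foldl_cons]
    rw [ih, ih (if g.1 then 0 + 6 * g.2 + 25 * max 0 (g.2 - 7) else 0)]
    split <;> ring

theorem foldl_group_cons (g : Bool × Int) (gs : List (Bool × Int)) :
    ((g :: gs).foldl (fun acc h => if h.1 then acc + 6 * h.2 + 25 * max 0 (h.2 - 7) else acc) 0)
      = (if g.1 then 6 * g.2 + 25 * max 0 (g.2 - 7) else 0)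
        + gs.foldl (fun acc h => if h.1 then acc + 6 * h.2 + 25 * max 0 (h.2 - 7) else acc) 0 := by
  rw [List.foldl_cons, foldl_group_shift]
  split <;> ring

-- A's loop across a run of favourable hours, in closed form
theorem stepP_trues (n : Nat) : ∀ (rest : List Bool) (s c : Int), 0 ≤ c →
    (List.replicate n true ++ rest).foldl stepP (s, c)
      = rest.foldl stepP (s + 6 * n + 25 * (max 0 (c + n - 7) - max 0 (c - 7)), c + n) := by
  induction n with
  | zero =>
    intro rest s c _
    simp only [List.replicate, List.nil_append, Nat.cast_zero]
    have h1 : s + 6 * (0:Int) + 25 * (max 0 (c + 0 - 7) - max 0 (c - 7)) = s := by omega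
    have h2 : c + (0:Int) = c := by omega
    rw [h1, h2]
  | succ m ih =>
    intro rest s c hc
    rw [List.replicate_succ]
    simp only [List.cons_append, List.foldl_cons]
    have h1 : stepP (s, c) true = (if 8 ≤ c + 1 then s + 6 + 25 else s + 6, c + 1) := by
      simp [stepP]
    rw [h1, ih rest _ (c + 1) (by omega)]
    have h2 : (if 8 ≤ c + 1 then s + 6 + 25 else s + 6) + 6 * (m:Int)
          + 25 * (max 0 (c + 1 + m - 7) - max 0 (c + 1 - 7))
        = s + 6 * ((m:Int) + 1) + 25 * (max 0 (c + (m + 1) - 7) - max 0 (c - 7)) := by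
      split_ifs <;> omega
    have h3 : c + 1 + (m:Int) = c + ((m:Int) + 1) := by omega
    rw [h2, h3]
    push_cast
    ring_nf

-- A's loop across a run of unfavourable hours resets and adds nothing
theorem stepP_falses (n : Nat) : ∀ (rest : List Bool) (s : Int),
    (List.replicate n false ++ rest).foldl stepP (s, 0) = rest.foldl stepP (s, 0) := by
  induction n with
  | zero => intro rest s; simp
  | succ m ih =>
    intro rest s
    rw [List.replicate_succ]
    simp only [List.cons_append, List.foldl_cons]
    have : stepP (s, 0) false = (s, 0) := by simp [stepP]
    rw [this, ih]

theorem takeWhile_eq_replicate (b : Bool) (t : List Bool) :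
    t.takeWhile (· == b) = List.replicate (t.takeWhile (· == b)).length b := by
  apply List.eq_replicate_of_mem
  intro x hx
  have := List.mem_takeWhile_imp hx
  simpa using this

-- the head of a dropWhile (if any) fails the predicate
theorem head?_dropWhile_false (p : Bool → Bool) (t : List Bool) (x : Bool)
    (h : (t.dropWhile p).head? = some x) : p x = false := by
  induction t with
  | nil => simp at h
  | cons y ys ih =>
    rw [List.dropWhile_cons] at h
    by_cases hy : p y = true
    · rw [if_pos hy] at h; exact ih h
    · rw [if_neg hy] at h
      simp only [List.head?_cons, Option.some.injEq] at h
      subst h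
      simpa using hy

-- if the list starts with an unfavourable hour, the incoming counter value is irrelevant
theorem foldl_fst_reset (l : List Bool) (h : ∀ x, l.head? = some x → x = false) :
    ∀ s' c : Int, (l.foldl stepP (s', c)).1 = (l.foldl stepP (s', 0)).1 := by
  cases l with
  | nil => intro s' c; rfl
  | cons x r =>
    intro s' c
    have hx : x = false := h x rfl
    subst hx
    simp only [List.foldl_cons]
    have e1 : stepP (s', c) false = (s', 0) := by simp [stepP]
    have e2 : stepP (s', 0) false = (s', 0) := by simp [stepP]
    rw [e1, e2]

-- the core equivalence: A's counter loop = B's per-run closed forms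
theorem loop_eq_groups (fs : List Bool) : ∀ s : Int,
    ((fs.foldl stepP (s, 0)).1)
      = s + (pyGroupby fs).foldl
          (fun acc g => if g.1 then acc + 6 * g.2 + 25 * max 0 (g.2 - 7) else acc) 0 := by
  induction hn : fs.length using Nat.strong_induction_on generalizing fs with
  | _ n ih =>
    intro s
    rcases fs with _ | ⟨b, t⟩
    · simp [pyGroupby]
    · have hlen : t.length + 1 = n := by simpa using hn
      have hsplit : t = t.takeWhile (· == b) ++ t.dropWhile (· == b) :=
        (List.takeWhile_append_dropWhile).symm
      set k := (t.takeWhile (· == b)).length with hk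
      set rest := t.dropWhile (· == b) with hrest
      have hrl : rest.length < n := by
        have h1 : rest.length ≤ t.length := List.length_dropWhile_le _ t
        omega
      rw [pyGroupby, ← hrest, ← hk]
      cases b with
      | true =>
        have hrest_reset : ∀ s' c : Int, (rest.foldl stepP (s', c)).1 = (rest.foldl stepP (s', 0)).1 := by
          refine foldl_fst_reset rest (fun x hx => ?_)
          have hb := head?_dropWhile_false (· == true) t x hx
          simpa using hb
        have hfold : ((true :: t).foldl stepP (s, 0))
            = rest.foldl stepP (s + 6 * (1 + (k:Int)) + 25 * max 0 (1 + (k:Int) - 7), 1 + k) := by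
          have hform : (true :: t) = List.replicate (1 + k) true ++ rest := by
            rw [List.replicate_add]
            simp only [List.replicate_one, List.append_assoc]
            rw [← takeWhile_eq_replicate, ← hsplit]
            simp
          rw [hform, stepP_trues (1 + k) rest s 0 (by omega)]
          have e1 : s + 6 * ((1 + k : Nat) : Int) + 25 * (max 0 ((0:Int) + (1 + k : Nat) - 7) - max 0 ((0:Int) - 7))
              = s + 6 * (1 + (k:Int)) + 25 * max 0 (1 + (k:Int) - 7) := by
            push_cast; omega
          have e2 : (0:Int) + ((1 + k : Nat) : Int) = 1 + (k:Int) := by push_cast; omega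
          rw [e1, e2]
        rw [hfold, hrest_reset, ih rest.length hrl rest rfl, foldl_group_cons]
        have hif : (if ((true : Bool), 1 + (k:Int)).1 = true
              then 6 * ((true : Bool), 1 + (k:Int)).2 + 25 * max 0 (((true : Bool), 1 + (k:Int)).2 - 7)
              else 0)
            = 6 * (1 + (k:Int)) + 25 * max 0 (1 + (k:Int) - 7) := by
          norm_num
        rw [hif]
        ring
      | false =>
        have hfold : ((false :: t).foldl stepP (s, 0)) = rest.foldl stepP (s, 0) := by
          have hform : (false :: t) = List.replicate (1 + k) false ++ rest := by
            rw [List.replicate_add]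
            simp only [List.replicate_one, List.append_assoc]
            rw [← takeWhile_eq_replicate, ← hsplit]
            simp
          rw [hform, stepP_falses]
        rw [hfold, ih rest.length hrl rest rfl, foldl_group_cons]
        norm_num

-- ===== VERDICT (by name: the statement is the Claim_ definition above) =====
theorem score_rouille_noire_spec : Claim_equal_score_rouille_noire := by
  intro hours _ hpre
  unfold Spec_score_rouille_noire score_rouille_noire score_rouille_noire_alt
  have hs24 : PySem.List.slice hours none (some 24) = hours.take 24 := by
    have := PySem.List.slice_to_natCast hours 24
    simpa using this
  unfold Pre_score_rouille_noire at hpre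
  rw [List.all_eq_true] at hpre
  have hall : ∀ h ∈ hours.take 24, (favTest h).isSome :=
    fun h hh => favTest_isSome_of_pre h (hpre h hh)
  have hms := mapM_favTest_isSome (hours.take 24) hall
  cases hm : (hours.take 24).mapM favTest with
  | none => rw [hm] at hms; simp at hms
  | some fs =>
    rw [hs24, hm]
    rw [foldl_stepA_eq_stepP (hours.take 24) fs hm (0, 0)]
    simp only
    rw [show ((fs.foldl stepP (0, 0)).1)
          = 0 + (pyGroupby fs).foldl
              (fun acc g => if g.1 then acc + 6 * g.2 + 25 * max 0 (g.2 - 7) else acc) 0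
        from loop_eq_groups fs 0]
    simp
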